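-- pv_equiv track=rewrite | github.com/pymongo/python_leetcode | collections/valid_anagram.py | rolling_hash
-- ===== SOURCE A (Python) =====
-- def rolling_hash(source: str, target: str) -> bool:
--     """
--     FIXME rolling_hash的特性是字母会有序，所以这题用不了rollingHash
--     """
--     source_hash = 0
--     for letter in source:
--         ord_letter = ord(letter) - 98
--         source_hash = (source_hash * 26 + ord_letter) % 100000
--     target_hash = 0
--     for letter in target:
--         ord_letter = ord(letter) - 98
--         target_hash = (target_hash * 26 + ord_letter) % 100000
--     return source_hash == target_hash
-- ===== SOURCE B (Python) =====
-- def rolling_hash(source: str, target: str) -> bool: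
--     M = 100000
--     def h(s):
--         n = len(s)
--         return sum((ord(c) - 98) * pow(26, n - 1 - i, M) for i, c in enumerate(s)) % M
--     return h(source) == h(target)
-- ===== Notes on version B (the rewrite author's own statement) =====
-- stated objective: alternative
-- what changed: Replaces A's stateful Horner accumulation loops with a stateless positional formulation: each character contributes (ord(c)-98)*pow(26, n-1-i, M) independently via enumerate, the terms are summed and reduced mod M once.
import Mathlib
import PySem

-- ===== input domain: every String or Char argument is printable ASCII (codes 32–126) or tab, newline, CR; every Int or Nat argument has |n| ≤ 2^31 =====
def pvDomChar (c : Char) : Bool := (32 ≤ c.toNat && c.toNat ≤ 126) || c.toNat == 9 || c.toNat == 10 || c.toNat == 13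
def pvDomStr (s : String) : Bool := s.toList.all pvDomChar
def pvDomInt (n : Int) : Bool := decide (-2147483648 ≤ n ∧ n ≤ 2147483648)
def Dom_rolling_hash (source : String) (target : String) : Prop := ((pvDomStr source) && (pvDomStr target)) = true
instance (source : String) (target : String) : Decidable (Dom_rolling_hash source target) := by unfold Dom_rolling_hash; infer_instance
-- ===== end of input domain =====

-- B replaces A's stateful Horner loops with a stateless positional sum: each character's
-- term (ord c - 98) * 26^(n-1-i) mod M is computed independently and the terms are summed
-- (alternative decomposition, same practical cost).

-- ===== PORT A =====
-- A: Horner accumulation left-to-right, per-step mod 100000, for each string; compare.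
def pvHorner (l : List Char) : Int :=
  l.foldl (fun h c => (h * 26 + ((c.toNat : Int) - 98)) % 100000) 0

def rolling_hash (source : String) (target : String) : Bool :=
  pvHorner source.toList == pvHorner target.toList

-- ===== PORT B =====
-- pow(26, e, 100000) (Python's three-argument pow, ported as the modular power it computes)
def pvPowMod (e : Nat) : Int := (26 ^ e : Int) % 100000

-- h(s): sum of independent positional terms over enumerate(s), one final mod
def pvSumHash (l : List Char) : Int :=
  ((PySem.List.enumerate l).map (fun p =>
      ((p.2.toNat : Int) - 98) * pvPowMod (l.length - 1 - p.1.toNat))).sum % 100000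

def rolling_hash_alt (source : String) (target : String) : Bool :=
  pvSumHash source.toList == pvSumHash target.toList

-- ===== PRECONDITION & SPEC =====
def Spec_rolling_hash (source : String) (target : String) (out : Bool) : Prop := out = rolling_hash_alt source target
instance (source : String) (target : String) (out : Bool) : Decidable (Spec_rolling_hash source target out) := by unfold Spec_rolling_hash; infer_instance

-- ===== CLAIM (what is proved, stated in full; the proofs are below) =====
def Claim_equal_rolling_hash : Prop := ∀ (source : String) (target : String), Dom_rolling_hash source target → Spec_rolling_hash source target (rolling_hash source target)

-- ===== LEMMAS AND PROOFS =====

-- the exact (un-reduced) degree-weighted polynomial both hashes compute mod 100000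
def pvVal : List Char → Int
  | [] => 0
  | c :: t => ((c.toNat : Int) - 98) * 26 ^ t.length + pvVal t

theorem pvHorner_go (l : List Char) (acc : Int) (hacc : acc % 100000 = acc) :
    l.foldl (fun h c => (h * 26 + ((c.toNat : Int) - 98)) % 100000) acc
      = (acc * 26 ^ l.length + pvVal l) % 100000 := by
  induction l generalizing acc with
  | nil => simpa [pvVal] using hacc.symm
  | cons c t ih =>
    simp only [List.foldl_cons, pvVal, List.length_cons,
      ih _ (Int.emod_emod_of_dvd _ dvd_rfl)]
    have h1 : ((acc * 26 + ((c.toNat : Int) - 98)) % 100000) ≡ acc * 26 + ((c.toNat : Int) - 98) [ZMOD 100000] :=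
      Int.emod_emod_of_dvd _ dvd_rfl
    have h2 := ((h1.mul_right (26 ^ t.length)).add_right (pvVal t))
    calc ((acc * 26 + ((c.toNat : Int) - 98)) % 100000) * 26 ^ t.length + pvVal t ≡
        (acc * 26 + ((c.toNat : Int) - 98)) * 26 ^ t.length + pvVal t [ZMOD 100000] := h2
      _ = acc * 26 ^ (t.length + 1) + (((c.toNat : Int) - 98) * 26 ^ t.length + pvVal t) := by ring

theorem pvHorner_eq (l : List Char) : pvHorner l = pvVal l % 100000 := by
  rw [pvHorner, pvHorner_go _ _ (by decide)]
  simp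

theorem pvSum_go (l : List Char) (s : Nat) :
    ((PySem.List.enumerate l (s : Int)).map (fun p =>
        ((p.2.toNat : Int) - 98) * pvPowMod (s + l.length - 1 - p.1.toNat))).sum
      ≡ pvVal l [ZMOD 100000] := by
  induction l generalizing s with
  | nil => simp [PySem.List.enumerate_nil, pvVal]
  | cons c t ih =>
    rw [PySem.List.enumerate_cons]
    simp only [List.map_cons, List.sum_cons, pvVal, List.length_cons]
    have hhead : s + (t.length + 1) - 1 - (s : Int).toNat = t.length := by
      simp
    have htail : ((PySem.List.enumerate t ((s : Int) + 1)).map (fun p =>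
          ((p.2.toNat : Int) - 98) * pvPowMod (s + (t.length + 1) - 1 - p.1.toNat))).sum
        ≡ pvVal t [ZMOD 100000] := by
      have hcast : ((s : Int) + 1) = ((s + 1 : Nat) : Int) := by push_cast; ring
      have hfun : ∀ p : Int × Char,
          s + (t.length + 1) - 1 - p.1.toNat = (s + 1) + t.length - 1 - p.1.toNat := by
        intro p; omega
      rw [hcast, List.map_congr_left (fun p _ => by rw [hfun p])]
      exact ih (s + 1)
    have hpow : pvPowMod t.length ≡ 26 ^ t.length [ZMOD 100000] :=
      Int.emod_emod_of_dvd _ dvd_rfl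
    rw [hhead]
    exact ((hpow.mul_left _).add htail)

theorem pvSumHash_eq (l : List Char) : pvSumHash l = pvVal l % 100000 := by
  have h := pvSum_go l 0
  simp only [Nat.cast_zero] at h
  unfold pvSumHash
  have hfun : ∀ p : Int × Char,
      (l.length - 1 - p.1.toNat) = (0 + l.length - 1 - p.1.toNat) := by intro p; omega
  rw [List.map_congr_left (fun p _ => by rw [hfun p])]
  exact h

-- ===== VERDICT (by name: the statement is the Claim_ definition above) =====
theorem rolling_hash_spec : Claim_equal_rolling_hash := by
  intro source target _
  show rolling_hash source target = rolling_hash_alt source target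
  simp [rolling_hash, rolling_hash_alt, pvHorner_eq, pvSumHash_eq]
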